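-- pv_equiv track=rewrite | github.com/MrBrantCode/unitest_baseline | mut_generate/mist_train_cf/cf_65606/solution.py | check_sorted_nested
-- ===== SOURCE A (Python) =====
-- def check_sorted_nested(input_list):
--     """
--     This function checks if a nested list is sorted based on the first element of each sublist.
--
--     Args:
--         input_list (list): The nested list to be checked.
--
--     Returns:
--         str: A string indicating the order of the list, or an error message if the list is not sorted.
--     """
--
--     # Check if each sublist has at least one element
--     if not all(len(sublist) > 0 for sublist in input_list):
--         return "Error: Each sublist must have at least one element."
--
--     # Check if list is sorted in ascending order
--     if all(input_list[i][0] <= input_list[i+1][0] for i in range(len(input_list)-1)):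
--         return "List is sorted in ascending order"
--
--     # Check if list is sorted in descending order
--     elif all(input_list[i][0] >= input_list[i+1][0] for i in range(len(input_list)-1)):
--         return "List is sorted in descending order"
--
--     # If list is neither sorted in ascending nor descending order
--     else:
--         return "List is not sorted"
-- ===== SOURCE B (Python) =====
-- def check_sorted_nested(input_list):
--     if not all(len(sublist) > 0 for sublist in input_list):
--         return "Error: Each sublist must have at least one element."
--     firsts = [sublist[0] for sublist in input_list]
--     if firsts == sorted(firsts):
--         return "List is sorted in ascending order"
--     if firsts == sorted(firsts, reverse=True):
--         return "List is sorted in descending order"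
--     return "List is not sorted"
-- ===== Notes on version B (the rewrite author's own statement) =====
-- stated objective: simpler
-- what changed: Replaces the two index-based adjacent-pair scans over input_list with one extraction of the first elements and a comparison against their sorted (and reverse-sorted) order.
import Mathlib
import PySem

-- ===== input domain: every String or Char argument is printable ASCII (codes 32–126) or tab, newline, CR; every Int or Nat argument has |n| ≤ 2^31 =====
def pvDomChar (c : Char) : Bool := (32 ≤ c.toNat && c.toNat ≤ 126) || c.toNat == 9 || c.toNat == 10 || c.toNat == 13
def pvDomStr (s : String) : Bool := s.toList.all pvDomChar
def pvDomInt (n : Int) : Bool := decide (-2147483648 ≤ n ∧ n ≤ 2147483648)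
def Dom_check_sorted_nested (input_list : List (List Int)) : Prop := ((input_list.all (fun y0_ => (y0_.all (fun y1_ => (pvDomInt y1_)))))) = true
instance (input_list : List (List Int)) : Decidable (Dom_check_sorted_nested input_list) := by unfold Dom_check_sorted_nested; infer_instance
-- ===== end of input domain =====

-- B checks the extracted first elements against their stable sort (and reverse sort)
-- instead of A's two index-based adjacent-pair scans; objective: simpler.

-- ===== PORT A =====
-- input_list[i][0] <= input_list[i+1][0]  (false on IndexError; never hit under the guard)
def pvPairLe (l : List (List Int)) (i : Int) : Bool :=
  match PySem.List.pyGet? l i, PySem.List.pyGet? l (i + 1) with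
  | some a, some b =>
    match PySem.List.pyGet? a 0, PySem.List.pyGet? b 0 with
    | some x, some y => decide (x ≤ y)
    | _, _ => false
  | _, _ => false

-- input_list[i][0] >= input_list[i+1][0]
def pvPairGe (l : List (List Int)) (i : Int) : Bool :=
  match PySem.List.pyGet? l i, PySem.List.pyGet? l (i + 1) with
  | some a, some b =>
    match PySem.List.pyGet? a 0, PySem.List.pyGet? b 0 with
    | some x, some y => decide (y ≤ x)
    | _, _ => false
  | _, _ => false

def check_sorted_nested (input_list : List (List Int)) : String :=
  if !(input_list.all (fun sublist => decide (0 < sublist.length))) then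
    "Error: Each sublist must have at least one element."
  else if (PySem.List.pyRange 0 ((input_list.length : Int) - 1) 1).all (pvPairLe input_list) then
    "List is sorted in ascending order"
  else if (PySem.List.pyRange 0 ((input_list.length : Int) - 1) 1).all (pvPairGe input_list) then
    "List is sorted in descending order"
  else
    "List is not sorted"

-- ===== PORT B =====
def check_sorted_nested_alt (input_list : List (List Int)) : String :=
  if !(input_list.all (fun sublist => decide (0 < sublist.length))) then
    "Error: Each sublist must have at least one element."
  else
    -- sublist[0]; the guard guarantees every sublist is nonempty, so headI is exact
    let firsts := input_list.map List.headI
    if firsts = PySem.List.sorted firsts (fun x => x) false then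
      "List is sorted in ascending order"
    else if firsts = PySem.List.sorted firsts (fun x => x) true then
      "List is sorted in descending order"
    else
      "List is not sorted"

-- ===== PRECONDITION & SPEC =====
def Spec_check_sorted_nested (input_list : List (List Int)) (out : String) : Prop := out = check_sorted_nested_alt input_list
instance (input_list : List (List Int)) (out : String) : Decidable (Spec_check_sorted_nested input_list out) := by unfold Spec_check_sorted_nested; infer_instance

-- ===== CLAIM (what is proved, stated in full; the proofs are below) =====
def Claim_equal_check_sorted_nested : Prop := ∀ (input_list : List (List Int)), Dom_check_sorted_nested input_list → Spec_check_sorted_nested input_list (check_sorted_nested input_list)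

-- ===== LEMMAS AND PROOFS =====

-- s[0] of a nonempty list is its (default-valued) head
theorem pv_first_get (s : List Int) (hs : s ≠ []) :
    PySem.List.pyGet? s 0 = some s.headI := by
  cases s with
  | nil => exact absurd rfl hs
  | cons a t => simp

theorem pv_pairLe_eval (l : List (List Int)) (hne : ∀ s ∈ l, s ≠ [])
    (i : Nat) (hi : i + 1 < l.length) :
    pvPairLe l (i : Int) = decide ((l[i]'(by omega)).headI ≤ (l[i + 1]'hi).headI) := by
  unfold pvPairLe
  have h1 : ((i : Int) + 1) = ((i + 1 : Nat) : Int) := by push_cast; ring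
  rw [h1, PySem.List.pyGet?_natCast, PySem.List.pyGet?_natCast,
      List.getElem?_eq_getElem (by omega : i < l.length), List.getElem?_eq_getElem hi]
  have e1 := pv_first_get (l[i]'(by omega)) (hne _ (List.getElem_mem _))
  have e2 := pv_first_get (l[i + 1]'hi) (hne _ (List.getElem_mem _))
  simp [e1, e2]

theorem pv_pairGe_eval (l : List (List Int)) (hne : ∀ s ∈ l, s ≠ [])
    (i : Nat) (hi : i + 1 < l.length) :
    pvPairGe l (i : Int) = decide ((l[i + 1]'hi).headI ≤ (l[i]'(by omega)).headI) := by
  unfold pvPairGe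
  have h1 : ((i : Int) + 1) = ((i + 1 : Nat) : Int) := by push_cast; ring
  rw [h1, PySem.List.pyGet?_natCast, PySem.List.pyGet?_natCast,
      List.getElem?_eq_getElem (by omega : i < l.length), List.getElem?_eq_getElem hi]
  have e1 := pv_first_get (l[i]'(by omega)) (hne _ (List.getElem_mem _))
  have e2 := pv_first_get (l[i + 1]'hi) (hne _ (List.getElem_mem _))
  simp [e1, e2]

theorem pv_nonempty (l : List (List Int))
    (h : l.all (fun sublist => decide (0 < sublist.length)) = true) :
    ∀ s ∈ l, s ≠ [] := by
  intro s hs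
  have := List.all_eq_true.mp h s hs
  simp only [decide_eq_true_eq] at this
  exact List.ne_nil_of_length_pos this

-- Under the nonempty guard, A's ascending adjacent-pair scan says exactly that the
-- list of first elements is a ≤-chain.
theorem pv_asc_iff (l : List (List Int))
    (h : l.all (fun sublist => decide (0 < sublist.length)) = true) :
    ((PySem.List.pyRange 0 ((l.length : Int) - 1) 1).all (pvPairLe l) = true) ↔
      (l.map List.headI).IsChain (· ≤ ·) := by
  have hne := pv_nonempty l h
  rw [List.all_eq_true, List.isChain_iff_getElem]
  constructor
  · intro H i hi
    simp only [List.length_map] at hi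
    have hm : (i : Int) ∈ PySem.List.pyRange 0 ((l.length : Int) - 1) 1 :=
      PySem.List.mem_pyRange_one.mpr ⟨by omega, by omega⟩
    have := H _ hm
    rw [pv_pairLe_eval l hne i hi] at this
    simpa using of_decide_eq_true this
  · intro H x hx
    obtain ⟨hx0, hx1⟩ := PySem.List.mem_pyRange_one.mp hx
    obtain ⟨i, rfl⟩ : ∃ i : Nat, x = (i : Int) := ⟨x.toNat, (Int.toNat_of_nonneg hx0).symm⟩
    have hi : i + 1 < l.length := by omega
    rw [pv_pairLe_eval l hne i hi]
    have := H i (by simpa using hi)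
    simpa using this

theorem pv_desc_iff (l : List (List Int))
    (h : l.all (fun sublist => decide (0 < sublist.length)) = true) :
    ((PySem.List.pyRange 0 ((l.length : Int) - 1) 1).all (pvPairGe l) = true) ↔
      (l.map List.headI).IsChain (fun a b => b ≤ a) := by
  have hne := pv_nonempty l h
  rw [List.all_eq_true, List.isChain_iff_getElem]
  constructor
  · intro H i hi
    simp only [List.length_map] at hi
    have hm : (i : Int) ∈ PySem.List.pyRange 0 ((l.length : Int) - 1) 1 :=
      PySem.List.mem_pyRange_one.mpr ⟨by omega, by omega⟩
    have := H _ hm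
    rw [pv_pairGe_eval l hne i hi] at this
    simpa using of_decide_eq_true this
  · intro H x hx
    obtain ⟨hx0, hx1⟩ := PySem.List.mem_pyRange_one.mp hx
    obtain ⟨i, rfl⟩ : ∃ i : Nat, x = (i : Int) := ⟨x.toNat, (Int.toNat_of_nonneg hx0).symm⟩
    have hi : i + 1 < l.length := by omega
    rw [pv_pairGe_eval l hne i hi]
    have := H i (by simpa using hi)
    simpa using this

-- B's comparison with the stable sort says the same chain condition.
theorem pv_sorted_iff (f : List Int) :
    (f = PySem.List.sorted f (fun x => x) false) ↔ f.IsChain (· ≤ ·) := by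
  constructor
  · intro h
    rw [List.isChain_iff_pairwise, h]
    simpa using PySem.List.sorted_pairwise f (fun x => x)
  · intro h
    refine (PySem.List.sorted_eq_self_of_pairwise f (fun x => x) ?_).symm
    simpa using List.isChain_iff_pairwise.mp h

theorem pv_sorted_rev_iff (f : List Int) :
    (f = PySem.List.sorted f (fun x => x) true) ↔ f.IsChain (fun a b => b ≤ a) := by
  have trans : Trans (fun a b : Int => b ≤ a) (fun a b : Int => b ≤ a) (fun a b : Int => b ≤ a) :=
    ⟨fun hab hbc => le_trans hbc hab⟩
  constructor
  · intro h
    rw [@List.isChain_iff_pairwise _ _ _ trans, h]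
    simpa using PySem.List.sorted_pairwise_rev f (fun x => x)
  · intro h
    refine (PySem.List.sorted_rev_eq_self_of_pairwise f (fun x => x) ?_).symm
    simpa using (@List.isChain_iff_pairwise _ _ _ trans).mp h

-- ===== VERDICT (by name: the statement is the Claim_ definition above) =====
theorem check_sorted_nested_spec : Claim_equal_check_sorted_nested := by
  intro l _
  unfold Spec_check_sorted_nested check_sorted_nested check_sorted_nested_alt
  by_cases hg : l.all (fun sublist => decide (0 < sublist.length)) = true
  · simp only [hg, Bool.not_true, Bool.false_eq_true, if_false]
    by_cases hasc : (l.map List.headI).IsChain (· ≤ ·)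
    · rw [if_pos ((pv_asc_iff l hg).2 hasc), if_pos ((pv_sorted_iff _).2 hasc)]
    · rw [if_neg (fun hc => hasc ((pv_asc_iff l hg).1 hc)),
          if_neg (fun hc => hasc ((pv_sorted_iff _).1 hc))]
      by_cases hdesc : (l.map List.headI).IsChain (fun a b => b ≤ a)
      · rw [if_pos ((pv_desc_iff l hg).2 hdesc), if_pos ((pv_sorted_rev_iff _).2 hdesc)]
      · rw [if_neg (fun hc => hdesc ((pv_desc_iff l hg).1 hc)),
            if_neg (fun hc => hdesc ((pv_sorted_rev_iff _).1 hc))]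
  · simp [hg]
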